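-- pv_equiv track=rewrite | github.com/MrBrantCode/unitest_baseline | mut_generate/mist_train_taco/taco_12316/solution.py | calculate_output
-- ===== SOURCE A (Python) =====
-- def calculate_output(input_string: str) -> int:
--     ans = 1
--     skip = 0
--     for i in range(1, 7):
--         if skip:
--             skip = 0
--             continue
--         if i + 1 < 7 and input_string[i] == '1' and input_string[i + 1] == '0':
--             ans += 10
--             skip = 1
--         else:
--             ans += ord(input_string[i]) - ord('0')
--     return ans
-- ===== SOURCE B (Python) =====
-- def calculate_output(input_string: str) -> int:
--     total = sum(ord(input_string[i]) - ord('0') for i in range(1, 7))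
--     return 1 + total + 9 * input_string[1:7].count('10')
-- ===== Notes on version B (the rewrite author's own statement) =====
-- stated objective: simpler
-- what changed: Replaced the skip-flag scanning loop with per-character branching by a closed-form expression: 1 plus the digit-sum of characters 1..6 plus 9 for each greedy non-overlapping digit-one-digit-zero pair counted by str.count on the slice input_string[1:7], which is exactly what the skip/look-ahead loop adds.
import Mathlib
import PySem

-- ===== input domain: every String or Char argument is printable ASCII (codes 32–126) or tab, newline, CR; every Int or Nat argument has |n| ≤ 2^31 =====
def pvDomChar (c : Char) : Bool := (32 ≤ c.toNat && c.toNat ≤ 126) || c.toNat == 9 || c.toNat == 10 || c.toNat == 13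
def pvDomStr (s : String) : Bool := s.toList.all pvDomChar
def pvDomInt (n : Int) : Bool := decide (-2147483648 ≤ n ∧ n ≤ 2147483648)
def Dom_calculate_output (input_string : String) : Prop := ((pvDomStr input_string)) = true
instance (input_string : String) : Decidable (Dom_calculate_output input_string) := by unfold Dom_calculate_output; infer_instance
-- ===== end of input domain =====

-- B replaces A's skip-flag scanning loop by a closed form: 1 + digit-sum of the 6-char
-- window + 9 per greedy non-overlapping one-zero pair counted in it (objective: simpler).


-- ===== PORT A =====
-- 'for i in range(1, 7)' as structural recursion over the remaining iteration count,
-- carrying the same state (ans, skip); fuel = 7 - i.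
def calculate_output_go (input_string : String) (fuel : Nat) (i : Int) (ans skip : Int) : Int :=
  match fuel with
  | 0 => ans
  | fuel + 1 =>
    if skip ≠ 0 then calculate_output_go input_string fuel (i + 1) ans 0
    else if decide (i + 1 < 7) && ((PySem.Str.pyGet? input_string i).getD '0' == '1')
            && ((PySem.Str.pyGet? input_string (i + 1)).getD '0' == '0') then
      calculate_output_go input_string fuel (i + 1) (ans + 10) 1
    else
      calculate_output_go input_string fuel (i + 1)
        (ans + (((PySem.Str.pyGet? input_string i).getD '0').toNat : Int) - 48) 0

def calculate_output (input_string : String) : Int :=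
  calculate_output_go input_string 6 1 1 0

-- ===== PORT B =====
def calculate_output_alt (input_string : String) : Int :=
  let total := ((PySem.List.pyRange 1 7 1).map
    (fun i => (((PySem.Str.pyGet? input_string i).getD '0').toNat : Int) - 48)).sum
  1 + total
    + 9 * (PySem.Str.count (PySem.Str.slice input_string (some 1) (some 7))
        (String.ofList ['1', '0']) : Int)

-- ===== PRECONDITION & SPEC =====
-- A indexes input_string[1]..input_string[6]; it raises IndexError on strings shorter
-- than 7 characters, so exactly those are excluded.
def Pre_calculate_output (input_string : String) : Prop :=
  7 ≤ input_string.toList.length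
instance (input_string : String) : Decidable (Pre_calculate_output input_string) := by
  unfold Pre_calculate_output; infer_instance

def pvWitness_calculate_output : String := "1010101"

def Spec_calculate_output (input_string : String) (out : Int) : Prop :=
  out = calculate_output_alt input_string
instance (input_string : String) (out : Int) : Decidable (Spec_calculate_output input_string out) := by
  unfold Spec_calculate_output; infer_instance

-- ===== CLAIM (what is proved, stated in full; the proofs are below) =====
def Claim_equal_calculate_output : Prop := ∀ (input_string : String), Dom_calculate_output input_string → Pre_calculate_output input_string → Spec_calculate_output input_string (calculate_output input_string)

-- ===== LEMMAS AND PROOFS =====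
set_option maxHeartbeats 4000000 in
theorem calculate_output_key (a b c d e f g : Char) (t : List Char) (s : String)
    (h : s.toList = a::b::c::d::e::f::g::t) :
    calculate_output s = calculate_output_alt s := by
  simp [calculate_output, calculate_output_go, calculate_output_alt, h,
    PySem.List.pyGet?_of_nonneg, PySem.Str.count, PySem.List.slice, PySem.List.pyRange,
    PySem.Chars.count, PySem.Chars.count.go, List.cons_prefix_iff, Int.toNat,
    List.range_succ]
  split_ifs <;> simp_all <;> omega

-- ===== VERDICT (by name: the statement is the Claim_ definition above) =====
theorem calculate_output_spec : Claim_equal_calculate_output := by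
  intro s _ hpre
  unfold Pre_calculate_output at hpre
  unfold Spec_calculate_output
  obtain ⟨a, b, c, d, e, f, g, t, h⟩ :
      ∃ a b c d e f g t, s.toList = a::b::c::d::e::f::g::t := by
    rcases hs : s.toList with _ | ⟨a, _ | ⟨b, _ | ⟨c, _ | ⟨d, _ | ⟨e, _ | ⟨f, _ | ⟨g, t⟩⟩⟩⟩⟩⟩⟩ <;>
      rw [hs] at hpre <;> simp at hpre <;>
      first
        | omega
        | exact ⟨_, _, _, _, _, _, _, _, rfl⟩
  exact calculate_output_key a b c d e f g t s h
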